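-- pv_equiv track=rewrite | github.com/rame8092/othello2025 | __init__.py | myai
-- ===== SOURCE A (Python) =====
-- def myai(board, color):
--     """
--     オセロの最適な置き手を返す関数
--     入力: board(6x6または8x8), color(1=白, 2=黒)
--     出力: (column, row)
--     """
--     size = len(board)
--     opponent = 3 - color
--
--     # コーナーとその隣の位置
--     corners = [(0, 0), (0, size-1), (size-1, 0), (size-1, size-1)]
--     corner_neighbors = [(0, 1), (1, 0), (1, size-1), (0, size-2),
--                         (size-1, 1), (size-2, 0), (size-2, size-1), (size-1, size-2)]
--
--     # T字位置（中央付近）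
--     t_positions = [(1, 2), (2, 1), (size-2, 1), (size-1, 2),
--                    (1, size-2), (2, size-1), (size-2, size-2), (size-1, size-2)]
--
--     valid_moves = []
--
--     # すべての置ける位置を探索
--     for row in range(size):
--         for col in range(size):
--             if board[row][col] == 0:
--                 flips = count_flips(board, col, row, color, opponent)
--                 if flips > 0:
--                     valid_moves.append((col, row, flips))
--
--     if not valid_moves:
--         return None
--
--     # 1. コーナーが取れるか
--     for col, row, flips in valid_moves:
--         if (col, row) in corners:
--             return (col, row)
--
--     # 2. T字位置（隣の角が置かれている場合のみ）
--     for col, row, flips in valid_moves: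
--         if (col, row) in t_positions:
--             for nc, nr in corner_neighbors:
--                 if board[nr][nc] == color:
--                     return (col, row)
--
--     # 3. コーナーの隣を避ける（隣の角が置かれていない場合）
--     filtered_moves = [m for m in valid_moves if (m[0], m[1]) not in corner_neighbors]
--
--     if filtered_moves:
--         valid_moves = filtered_moves
--
--     # 4. 最も多く石が取れる位置
--     best_move = max(valid_moves, key=lambda x: x[2])
--     return (best_move[0], best_move[1])
--
-- def count_flips(board, col, row, color, opponent):
--     """
--     指定位置に石を置いた時、取れる石の数を計算
--     """
--     size = len(board)
--     directions = [(-1, -1), (-1, 0), (-1, 1), (0, -1), (0, 1), (1, -1), (1, 0), (1, 1)]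
--     total_flips = 0
--
--     for dx, dy in directions:
--         flips = 0
--         x, y = col + dx, row + dy
--
--         while 0 <= x < size and 0 <= y < size and board[y][x] == opponent:
--             flips += 1
--             x += dx
--             y += dy
--
--         if 0 <= x < size and 0 <= y < size and board[y][x] == color and flips > 0:
--             total_flips += flips
--
--     return total_flips
-- ===== SOURCE B (Python) =====
-- def myai(board, color):
--     """Same move choice as A, via a single keyed max over the valid moves."""
--     size = len(board)
--     opponent = 3 - color
--     directions = [(-1, -1), (-1, 0), (-1, 1), (0, -1), (0, 1), (1, -1), (1, 0), (1, 1)]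
--
--     corners = [(0, 0), (0, size-1), (size-1, 0), (size-1, size-1)]
--     corner_neighbors = [(0, 1), (1, 0), (1, size-1), (0, size-2),
--                         (size-1, 1), (size-2, 0), (size-2, size-1), (size-1, size-2)]
--     t_positions = [(1, 2), (2, 1), (size-2, 1), (size-1, 2),
--                    (1, size-2), (2, size-1), (size-2, size-2), (size-1, size-2)]
--
--     def flips_at(col, row):
--         total = 0
--         for dx, dy in directions:
--             ray = []
--             x, y = col + dx, row + dy
--             while 0 <= x < size and 0 <= y < size:
--                 ray.append(board[y][x])
--                 x += dx
--                 y += dy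
--             k = next((i for i, v in enumerate(ray) if v != opponent), len(ray))
--             if 0 < k < len(ray) and ray[k] == color:
--                 total += k
--         return total
--
--     valid_moves = [(c, r, f) for r in range(size) for c in range(size)
--                    if board[r][c] == 0 and (f := flips_at(c, r)) > 0]
--     if not valid_moves:
--         return None
--
--     corner_owned = any(board[nr][nc] == color for nc, nr in corner_neighbors)
--
--     def key(m):
--         c, r, f = m
--         if (c, r) in corners:
--             return (4, 0)
--         if (c, r) in t_positions and corner_owned:
--             return (3, 0)
--         return ((1 if (c, r) in corner_neighbors else 2), f)
--
--     best = max(valid_moves, key=key)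
--     return (best[0], best[1])
-- ===== Notes on version B (the rewrite author's own statement) =====
-- stated objective: alternative
-- what changed: A's four sequential selection passes (return first corner; return first T-square when a corner-neighbour cell is owned; filter out corner-neighbour moves; max by flips) are replaced by a single keyed max over the valid moves using the priority key (4,0)/(3,0)/(2,flips)/(1,flips), and count_flips's per-direction walk-and-count loop is replaced by building the in-range ray and taking the length of its opponent prefix.
import Mathlib
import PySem

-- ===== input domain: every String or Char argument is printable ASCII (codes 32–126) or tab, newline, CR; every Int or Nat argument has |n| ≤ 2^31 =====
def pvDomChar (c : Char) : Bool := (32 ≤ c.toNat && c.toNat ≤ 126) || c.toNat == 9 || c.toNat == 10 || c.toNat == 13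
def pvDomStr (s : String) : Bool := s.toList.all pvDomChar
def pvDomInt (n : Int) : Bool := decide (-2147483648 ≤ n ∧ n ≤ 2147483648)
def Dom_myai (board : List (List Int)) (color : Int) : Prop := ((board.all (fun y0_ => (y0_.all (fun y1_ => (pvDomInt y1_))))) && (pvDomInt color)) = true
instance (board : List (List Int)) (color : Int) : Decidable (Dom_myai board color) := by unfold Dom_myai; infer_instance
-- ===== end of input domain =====

-- B replaces A's four sequential selection passes (corner / T-square / neighbour filter / max-flips)
-- by one keyed max over the valid moves; equivalence of the two selections is proved below.

-- shared board data (plain data, used by both ports)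
def pvCell (board : List (List Int)) (y x : Int) : Int :=
  PySem.List.pyGetD (PySem.List.pyGetD board y []) x 0
def pvDirs : List (Int × Int) := [(-1,-1),(-1,0),(-1,1),(0,-1),(0,1),(1,-1),(1,0),(1,1)]
def pvCorners (size : Int) : List (Int × Int) := [(0,0),(0,size-1),(size-1,0),(size-1,size-1)]
def pvNeighbors (size : Int) : List (Int × Int) :=
  [(0,1),(1,0),(1,size-1),(0,size-2),(size-1,1),(size-2,0),(size-2,size-1),(size-1,size-2)]
def pvTpos (size : Int) : List (Int × Int) :=
  [(1,2),(2,1),(size-2,1),(size-1,2),(1,size-2),(2,size-1),(size-2,size-2),(size-1,size-2)]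

-- ===== PORT A =====
-- A's inner while loop: walk while in range and cell == opponent, counting flips (fuel = size+1, always enough)
def pvScanA (board : List (List Int)) (size opp dx dy : Int) : Nat → Int → Int → Int → Int × Int × Int
  | 0, flips, x, y => (flips, x, y)
  | n+1, flips, x, y =>
    if 0 ≤ x ∧ x < size ∧ 0 ≤ y ∧ y < size ∧ pvCell board y x = opp then
      pvScanA board size opp dx dy n (flips+1) (x+dx) (y+dy)
    else (flips, x, y)

def pvCountFlips (board : List (List Int)) (col row color opp : Int) : Int :=
  let size : Int := (board.length : Int)
  pvDirs.foldl (fun total d =>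
    let r := pvScanA board size opp d.1 d.2 (board.length + 1) 0 (col + d.1) (row + d.2)
    if 0 ≤ r.2.1 ∧ r.2.1 < size ∧ 0 ≤ r.2.2 ∧ r.2.2 < size ∧
        pvCell board r.2.2 r.2.1 = color ∧ r.1 > 0 then
      total + r.1
    else total) 0

def myai (board : List (List Int)) (color : Int) : Option (Int × Int) :=
  let size : Int := (board.length : Int)
  let opp := 3 - color
  let vm := (PySem.List.pyRange 0 size 1).foldl (fun acc row =>
      (PySem.List.pyRange 0 size 1).foldl (fun acc col =>
        if pvCell board row col = 0 then
          let f := pvCountFlips board col row color opp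
          if f > 0 then acc ++ [(col, row, f)] else acc
        else acc) acc) []
  if vm = [] then none
  else
    match vm.find? (fun m => (pvCorners size).contains (m.1, m.2.1)) with
    | some m => some (m.1, m.2.1)
    | none =>
      match vm.find? (fun m => (pvTpos size).contains (m.1, m.2.1) &&
          (pvNeighbors size).any (fun p => pvCell board p.2 p.1 == color)) with
      | some m => some (m.1, m.2.1)
      | none =>
        let filtered := vm.filter (fun m => !(pvNeighbors size).contains (m.1, m.2.1))
        let vm2 := if filtered = [] then vm else filtered
        match PySem.List.max? vm2 (fun m => m.2.2) with
        | some m => some (m.1, m.2.1)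
        | none => none

-- ===== PORT B =====
-- B's ray builder: the in-range cells along a direction (fuel = size+1, always enough)
def pvRayB (board : List (List Int)) (size dx dy : Int) : Nat → Int → Int → List Int
  | 0, _, _ => []
  | n+1, x, y =>
    if 0 ≤ x ∧ x < size ∧ 0 ≤ y ∧ y < size then
      pvCell board y x :: pvRayB board size dx dy n (x+dx) (y+dy)
    else []

def pvFlipsAt (board : List (List Int)) (col row color opp : Int) : Int :=
  let size : Int := (board.length : Int)
  pvDirs.foldl (fun total d =>
    let ray := pvRayB board size d.1 d.2 (board.length + 1) (col + d.1) (row + d.2)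
    let k := (ray.takeWhile (fun v => v == opp)).length
    if 0 < k ∧ k < ray.length ∧ ray.getD k 0 = color then total + (k : Int) else total) 0

def myai_alt (board : List (List Int)) (color : Int) : Option (Int × Int) :=
  let size : Int := (board.length : Int)
  let opp := 3 - color
  let vm := (PySem.List.pyRange 0 size 1).flatMap (fun r =>
      (PySem.List.pyRange 0 size 1).filterMap (fun c =>
        if pvCell board r c = 0 then
          let f := pvFlipsAt board c r color opp
          if f > 0 then some (c, r, f) else none
        else none))
  if vm = [] then none
  else
    let flag := (pvNeighbors size).any (fun p => pvCell board p.2 p.1 == color)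
    match PySem.List.max2? vm
      (fun m => if (pvCorners size).contains (m.1, m.2.1) then (4 : Int)
                else if (pvTpos size).contains (m.1, m.2.1) && flag then 3
                else if (pvNeighbors size).contains (m.1, m.2.1) then 1 else 2)
      (fun m => if (pvCorners size).contains (m.1, m.2.1) ||
                   ((pvTpos size).contains (m.1, m.2.1) && flag) then (0 : Int)
                else m.2.2) with
    | some m => some (m.1, m.2.1)
    | none => none

-- ===== PRECONDITION & SPEC =====
-- Pre_ excludes exactly the boards on which Python A raises IndexError: a row shorter than len(board).
def Pre_myai (board : List (List Int)) (color : Int) : Prop :=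
  ∀ r ∈ board, board.length ≤ r.length
instance (board : List (List Int)) (color : Int) : Decidable (Pre_myai board color) := by
  unfold Pre_myai; infer_instance
def pvWitness_myai : List (List Int) × Int := ([[0, 1, 2], [2, 1, 0], [0, 0, 0]], 1)

def Spec_myai (board : List (List Int)) (color : Int) (out : Option (Int × Int)) : Prop := out = myai_alt board color
instance (board : List (List Int)) (color : Int) (out : Option (Int × Int)) : Decidable (Spec_myai board color out) := by unfold Spec_myai; infer_instance

-- ===== CLAIM (what is proved, stated in full; the proofs are below) =====
def Claim_equal_myai : Prop := ∀ (board : List (List Int)) (color : Int), Dom_myai board color → Pre_myai board color → Spec_myai board color (myai board color)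

-- ===== LEMMAS AND PROOFS =====

lemma pv_scan_ray (board : List (List Int)) (size opp dx dy : Int) :
    ∀ (n : Nat) (x y flips : Int),
      pvScanA board size opp dx dy n flips x y =
        (flips + ((pvRayB board size dx dy n x y).takeWhile (fun v => v == opp)).length,
         x + ((pvRayB board size dx dy n x y).takeWhile (fun v => v == opp)).length * dx,
         y + ((pvRayB board size dx dy n x y).takeWhile (fun v => v == opp)).length * dy) := by
  intro n
  induction n with
  | zero => intro x y flips; simp [pvScanA, pvRayB]
  | succ n ih =>
    intro x y flips
    by_cases hin : 0 ≤ x ∧ x < size ∧ 0 ≤ y ∧ y < size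
    · by_cases hop : pvCell board y x = opp
      · have h1 : pvScanA board size opp dx dy (n+1) flips x y
            = pvScanA board size opp dx dy n (flips+1) (x+dx) (y+dy) := by
          simp [pvScanA, hin.1, hin.2.1, hin.2.2.1, hin.2.2.2, hop]
        have h2 : pvRayB board size dx dy (n+1) x y
            = pvCell board y x :: pvRayB board size dx dy n (x+dx) (y+dy) := by
          simp [pvRayB, hin.1, hin.2.1, hin.2.2.1, hin.2.2.2]
        rw [h1, ih, h2]
        simp [hop]
        refine ⟨by ring, by ring, by ring⟩
      · have h1 : pvScanA board size opp dx dy (n+1) flips x y = (flips, x, y) := by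
          simp [pvScanA, hop]
        have h2 : pvRayB board size dx dy (n+1) x y
            = pvCell board y x :: pvRayB board size dx dy n (x+dx) (y+dy) := by
          simp [pvRayB, hin.1, hin.2.1, hin.2.2.1, hin.2.2.2]
        rw [h1, h2]
        simp [hop]
    · have h1 : pvScanA board size opp dx dy (n+1) flips x y = (flips, x, y) := by
        simp only [pvScanA]
        rw [if_neg (by tauto)]
      have h2 : pvRayB board size dx dy (n+1) x y = [] := by
        simp only [pvRayB]
        rw [if_neg hin]
      rw [h1, h2]; simp

lemma pv_ray_inrange (board : List (List Int)) (size dx dy : Int) :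
    ∀ (n : Nat) (x y : Int) (j : Nat), j < (pvRayB board size dx dy n x y).length →
      0 ≤ x + j*dx ∧ x + j*dx < size ∧ 0 ≤ y + j*dy ∧ y + j*dy < size := by
  intro n
  induction n with
  | zero => intro x y j hj; simp [pvRayB] at hj
  | succ n ih =>
    intro x y j hj
    by_cases hin : 0 ≤ x ∧ x < size ∧ 0 ≤ y ∧ y < size
    · rw [show pvRayB board size dx dy (n+1) x y
          = pvCell board y x :: pvRayB board size dx dy n (x+dx) (y+dy) from by
        simp [pvRayB, hin.1, hin.2.1, hin.2.2.1, hin.2.2.2]] at hj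
      cases j with
      | zero => simpa using hin
      | succ j =>
        have h := ih (x+dx) (y+dy) j (by simpa using hj)
        have e1 : x + ((j:Int)+1)*dx = x + dx + (j:Int)*dx := by ring
        have e2 : y + ((j:Int)+1)*dy = y + dy + (j:Int)*dy := by ring
        push_cast
        rw [e1, e2]
        exact h
    · rw [show pvRayB board size dx dy (n+1) x y = [] from by
        simp only [pvRayB]; rw [if_neg hin]] at hj
      simp at hj


lemma pv_ray_get (board : List (List Int)) (size dx dy : Int) :
    ∀ (n : Nat) (x y : Int) (j : Nat), j < (pvRayB board size dx dy n x y).length →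
      (pvRayB board size dx dy n x y).getD j 0 = pvCell board (y + j*dy) (x + j*dx) := by
  intro n
  induction n with
  | zero => intro x y j hj; simp [pvRayB] at hj
  | succ n ih =>
    intro x y j hj
    by_cases hin : 0 ≤ x ∧ x < size ∧ 0 ≤ y ∧ y < size
    · rw [show pvRayB board size dx dy (n+1) x y
          = pvCell board y x :: pvRayB board size dx dy n (x+dx) (y+dy) from by
        simp [pvRayB, hin.1, hin.2.1, hin.2.2.1, hin.2.2.2]] at hj ⊢
      cases j with
      | zero => simp
      | succ j =>
        have h := ih (x+dx) (y+dy) j (by simpa using hj)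
        have e1 : x + ((j:Int)+1)*dx = x + dx + (j:Int)*dx := by ring
        have e2 : y + ((j:Int)+1)*dy = y + dy + (j:Int)*dy := by ring
        push_cast
        rw [e1, e2]
        simpa using h
    · rw [show pvRayB board size dx dy (n+1) x y = [] from by
        simp only [pvRayB]; rw [if_neg hin]] at hj
      simp at hj

lemma pv_ray_stop (board : List (List Int)) (size dx dy : Int) :
    ∀ (n : Nat) (x y : Int), (pvRayB board size dx dy n x y).length < n →
      ¬(0 ≤ x + ((pvRayB board size dx dy n x y).length : Int)*dx ∧
        x + ((pvRayB board size dx dy n x y).length : Int)*dx < size ∧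
        0 ≤ y + ((pvRayB board size dx dy n x y).length : Int)*dy ∧
        y + ((pvRayB board size dx dy n x y).length : Int)*dy < size) := by
  intro n
  induction n with
  | zero => intro x y h; omega
  | succ n ih =>
    intro x y h
    by_cases hin : 0 ≤ x ∧ x < size ∧ 0 ≤ y ∧ y < size
    · rw [show pvRayB board size dx dy (n+1) x y
          = pvCell board y x :: pvRayB board size dx dy n (x+dx) (y+dy) from by
        simp [pvRayB, hin.1, hin.2.1, hin.2.2.1, hin.2.2.2]] at h ⊢
      have hlt : (pvRayB board size dx dy n (x+dx) (y+dy)).length < n := by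
        simpa using h
      have h2 := ih (x+dx) (y+dy) hlt
      simp only [List.length_cons]
      have e1 : x + (((pvRayB board size dx dy n (x+dx) (y+dy)).length + 1 : Nat) : Int)*dx
          = x + dx + ((pvRayB board size dx dy n (x+dx) (y+dy)).length : Int)*dx := by
        push_cast; ring
      have e2 : y + (((pvRayB board size dx dy n (x+dx) (y+dy)).length + 1 : Nat) : Int)*dy
          = y + dy + ((pvRayB board size dx dy n (x+dx) (y+dy)).length : Int)*dy := by
        push_cast; ring
      rw [e1, e2]
      exact h2
    · rw [show pvRayB board size dx dy (n+1) x y = [] from by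
        simp only [pvRayB]; rw [if_neg hin]]
      simpa using hin

lemma pv_ray_len (board : List (List Int)) (size dx dy : Int)
    (hd : dx = 1 ∨ dx = -1 ∨ dy = 1 ∨ dy = -1) :
    ∀ (n : Nat) (x y : Int), (pvRayB board size dx dy n x y).length ≤ size.toNat := by
  intro n x y
  by_contra hcon
  have hcon : size.toNat < (pvRayB board size dx dy n x y).length := Nat.lt_of_not_ge hcon
  have h0 := pv_ray_inrange board size dx dy n x y 0 (by omega)
  have hs := pv_ray_inrange board size dx dy n x y size.toNat hcon
  simp only [Nat.cast_zero, zero_mul, add_zero] at h0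
  have hsz : ((size.toNat : Nat) : Int) = size := Int.toNat_of_nonneg (by omega)
  rw [hsz] at hs
  rcases hd with h | h | h | h <;> subst h <;>
    simp only [mul_one, mul_neg_one] at hs <;> omega

lemma pv_flips_dir (board : List (List Int)) (color opp col row dx dy : Int)
    (hd : dx = 1 ∨ dx = -1 ∨ dy = 1 ∨ dy = -1) (total : Int) :
    (let r := pvScanA board (board.length : Int) opp dx dy (board.length + 1) 0 (col + dx) (row + dy)
     if 0 ≤ r.2.1 ∧ r.2.1 < (board.length : Int) ∧ 0 ≤ r.2.2 ∧ r.2.2 < (board.length : Int) ∧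
         pvCell board r.2.2 r.2.1 = color ∧ r.1 > 0 then
       total + r.1
     else total)
    = (let ray := pvRayB board (board.length : Int) dx dy (board.length + 1) (col + dx) (row + dy)
       let k := (ray.takeWhile (fun v => v == opp)).length
       if 0 < k ∧ k < ray.length ∧ ray.getD k 0 = color then total + (k : Int) else total) := by
  simp only []
  rw [pv_scan_ray board (board.length : Int) opp dx dy (board.length + 1) (col + dx) (row + dy) 0]
  set R := pvRayB board (board.length : Int) dx dy (board.length + 1) (col + dx) (row + dy) with hR
  set K := (R.takeWhile (fun v => v == opp)).length with hK
  have hkle : K ≤ R.length := (List.takeWhile_prefix _).length_le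
  dsimp only
  by_cases hlt : K < R.length
  · have hin := pv_ray_inrange board (board.length : Int) dx dy (board.length + 1)
      (col + dx) (row + dy) K (by rw [← hR]; exact hlt)
    have hget := pv_ray_get board (board.length : Int) dx dy (board.length + 1)
      (col + dx) (row + dy) K (by rw [← hR]; exact hlt)
    rw [← hR] at hget
    by_cases hc : pvCell board (row + dy + K*dy) (col + dx + K*dx) = color
    · by_cases hk0 : 0 < K
      · rw [if_pos ⟨hin.1, hin.2.1, hin.2.2.1, hin.2.2.2, by simpa using hc, by omega⟩,
          if_pos ⟨hk0, hlt, by rw [hget]; exact hc⟩]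
        omega
      · rw [if_neg (by
            intro hcon
            have h5 := hcon.2.2.2.2.2
            omega),
          if_neg (by omega)]
    · rw [if_neg (by
          intro hcon
          exact hc (by simpa using hcon.2.2.2.2.1)),
        if_neg (by
          intro hcon
          rw [hget] at hcon
          exact hc hcon.2.2)]
  · have hkeq : K = R.length := by omega
    have hlen : R.length < board.length + 1 := by
      have h1 := pv_ray_len board (board.length : Int) dx dy hd (board.length + 1)
        (col + dx) (row + dy)
      rw [← hR] at h1
      simp only [Int.toNat_natCast] at h1
      omega
    have hstop := pv_ray_stop board (board.length : Int) dx dy (board.length + 1)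
      (col + dx) (row + dy) (by rw [← hR]; omega)
    rw [← hR] at hstop
    rw [if_neg (by
        rw [hkeq]
        intro hcon
        exact hstop ⟨hcon.1, hcon.2.1, hcon.2.2.1, hcon.2.2.2.1⟩),
      if_neg (by omega)]

lemma pv_flips_eq (board : List (List Int)) (col row color opp : Int) :
    pvCountFlips board col row color opp = pvFlipsAt board col row color opp := by
  unfold pvCountFlips pvFlipsAt
  apply PySem.List.foldl_congr_mem
  intro total d hd
  have hcases : d = (-1,-1) ∨ d = (-1,0) ∨ d = (-1,1) ∨ d = (0,-1) ∨ d = (0,1) ∨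
      d = (1,-1) ∨ d = (1,0) ∨ d = (1,1) := by simpa [pvDirs] using hd
  rcases hcases with h | h | h | h | h | h | h | h <;> subst h <;>
    exact pv_flips_dir board color opp col row _ _ (by norm_num) total

def pvBeats {α : Type} (k1 k2 : α → Int) (m x : α) : Bool :=
  decide (k1 m < k1 x) || (!decide (k1 x < k1 m) && decide (k2 m < k2 x))

lemma pv_max2_eq_foldl {α : Type} (k1 k2 : α → Int) (l : List α) :
    PySem.List.max2? l k1 k2 = l.foldl (fun acc x => match acc with
      | none => some x
      | some m => if pvBeats k1 k2 m x then some x else some m) none := rfl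

lemma pv_beats_true {α : Type} (k1 k2 : α → Int) (m x : α) :
    pvBeats k1 k2 m x = true ↔ (k1 m < k1 x ∨ (¬(k1 x < k1 m) ∧ k2 m < k2 x)) := by
  simp [pvBeats]

lemma pv_beats_false {α : Type} (k1 k2 : α → Int) (m x : α) :
    pvBeats k1 k2 m x = false ↔ (¬ k1 m < k1 x ∧ (k1 x < k1 m ∨ ¬ k2 m < k2 x)) := by
  simp only [pvBeats]; simp; omega

lemma pv_keep {α : Type} (k1 k2 : α → Int) :
    ∀ (l : List α) (b : α), (∀ y ∈ l, pvBeats k1 k2 b y = false) →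
      l.foldl (fun acc x => match acc with
        | none => some x
        | some m => if pvBeats k1 k2 m x then some x else some m) (some b) = some b := by
  intro l
  induction l with
  | nil => intro b _; rfl
  | cons a l ih =>
    intro b h
    have ha : pvBeats k1 k2 b a = false := h a (by simp)
    simp only [List.foldl_cons, ha]
    exact ih b (fun y hy => h y (by simp [hy]))

lemma pv_run {α : Type} (k1 k2 : α → Int) :
    ∀ (l₁ : List α) (b m : α) (l₂ : List α), pvBeats k1 k2 b m = true →
      (∀ y ∈ l₁, pvBeats k1 k2 y m = true) → (∀ y ∈ l₂, pvBeats k1 k2 m y = false) →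
      (l₁ ++ m :: l₂).foldl (fun acc x => match acc with
        | none => some x
        | some m => if pvBeats k1 k2 m x then some x else some m) (some b) = some m := by
  intro l₁
  induction l₁ with
  | nil =>
    intro b m l₂ hb _ h₂
    simp only [List.nil_append, List.foldl_cons, hb]
    exact pv_keep k1 k2 l₂ m h₂
  | cons a l₁ ih =>
    intro b m l₂ hb h₁ h₂
    simp only [List.cons_append, List.foldl_cons]
    cases hba : pvBeats k1 k2 b a with
    | true =>
      simp only [if_true]
      exact ih a m l₂ (h₁ a (by simp)) (fun y hy => h₁ y (by simp [hy])) h₂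
    | false =>
      simp only [Bool.false_eq_true, if_false]
      exact ih b m l₂ hb (fun y hy => h₁ y (by simp [hy])) h₂

lemma pv_max2_first {α : Type} (k1 k2 : α → Int) (l₁ : List α) (m : α) (l₂ : List α)
    (h₁ : ∀ y ∈ l₁, pvBeats k1 k2 y m = true) (h₂ : ∀ y ∈ l₂, pvBeats k1 k2 m y = false) :
    PySem.List.max2? (l₁ ++ m :: l₂) k1 k2 = some m := by
  rw [pv_max2_eq_foldl]
  cases l₁ with
  | nil =>
    simp only [List.nil_append, List.foldl_cons]
    exact pv_keep k1 k2 l₂ m h₂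
  | cons a l₁ =>
    simp only [List.cons_append, List.foldl_cons]
    exact pv_run k1 k2 l₁ a m l₂ (h₁ a (by simp)) (fun y hy => h₁ y (by simp [hy])) h₂

lemma pv_max1_aux {α : Type} (key : α → Int) :
    ∀ (l : List α) (b m : α),
      l.foldl (fun acc x => match acc with
        | none => some x
        | some m => if key m < key x then some x else some m) (some b) = some m →
      (m = b ∧ ∀ y ∈ l, key y ≤ key b) ∨
      ∃ l₁ l₂, l = l₁ ++ m :: l₂ ∧ key b < key m ∧
        (∀ y ∈ l₁, key y < key m) ∧ (∀ y ∈ l₂, key y ≤ key m) := by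
  intro l
  induction l with
  | nil => intro b m h; left; simp at h; exact ⟨h.symm ▸ rfl, by simp⟩
  | cons a l ih =>
    intro b m h
    simp only [List.foldl_cons] at h
    by_cases hba : key b < key a
    · rw [if_pos hba] at h
      rcases ih a m h with ⟨hm, hall⟩ | ⟨l₁, l₂, hl, hlt, h₁, h₂⟩
      · right
        exact ⟨[], l, by simp [hm], hm ▸ hba, by simp, hm ▸ hall⟩
      · right
        exact ⟨a :: l₁, l₂, by simp [hl], lt_trans hba hlt, by
          intro y hy
          rcases List.mem_cons.mp hy with h | h
          · exact h ▸ hlt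
          · exact h₁ y h, h₂⟩
    · rw [if_neg hba] at h
      rcases ih b m h with ⟨hm, hall⟩ | ⟨l₁, l₂, hl, hlt, h₁, h₂⟩
      · left
        exact ⟨hm, by
          intro y hy
          rcases List.mem_cons.mp hy with h | h
          · subst h; omega
          · exact hall y h⟩
      · right
        exact ⟨a :: l₁, l₂, by simp [hl], hlt, by
          intro y hy
          rcases List.mem_cons.mp hy with h | h
          · subst h; omega
          · exact h₁ y h, h₂⟩

lemma pv_max1_decomp {α : Type} (key : α → Int) (l : List α) (m : α)
    (h : PySem.List.max? l key = some m) :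
    ∃ l₁ l₂, l = l₁ ++ m :: l₂ ∧ (∀ y ∈ l₁, key y < key m) ∧ (∀ y ∈ l₂, key y ≤ key m) := by
  cases l with
  | nil => simp [PySem.List.max?] at h
  | cons a t =>
    have h' : t.foldl (fun acc x => match acc with
        | none => some x
        | some m => if key m < key x then some x else some m) (some a) = some m := h
    rcases pv_max1_aux key t a m h' with ⟨hm, hall⟩ | ⟨l₁, l₂, hl, hlt, h₁, h₂⟩
    · exact ⟨[], t, by simp [hm], by simp, hm ▸ hall⟩
    · exact ⟨a :: l₁, l₂, by simp [hl], by
        intro y hy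
        rcases List.mem_cons.mp hy with h | h
        · subst h; omega
        · exact h₁ y h, h₂⟩

lemma pv_filter_decomp {α : Type} (q : α → Bool) :
    ∀ (l f₁ f₂ : List α) (m : α), l.filter q = f₁ ++ m :: f₂ →
      ∃ l₁ l₂, l = l₁ ++ m :: l₂ ∧ l₁.filter q = f₁ ∧ l₂.filter q = f₂ ∧ q m = true := by
  intro l
  induction l with
  | nil => intro f₁ f₂ m h; simp at h
  | cons a l ih =>
    intro f₁ f₂ m h
    by_cases hq : q a = true
    · rw [List.filter_cons_of_pos hq] at h
      cases f₁ with
      | nil =>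
        simp only [List.nil_append] at h
        obtain ⟨rfl, hf⟩ := List.cons_eq_cons.mp h
        exact ⟨[], l, rfl, rfl, hf, hq⟩
      | cons b f₁ =>
        obtain ⟨rfl, hf⟩ := List.cons_eq_cons.mp h
        obtain ⟨l₁, l₂, rfl, he₁, he₂, hm⟩ := ih f₁ f₂ m hf
        exact ⟨a :: l₁, l₂, rfl, by rw [List.filter_cons_of_pos hq, he₁], he₂, hm⟩
    · rw [List.filter_cons_of_neg (by simpa using hq)] at h
      obtain ⟨l₁, l₂, rfl, he₁, he₂, hm⟩ := ih f₁ f₂ m h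
      exact ⟨a :: l₁, l₂, rfl, by rw [List.filter_cons_of_neg (by simpa using hq), he₁], he₂, hm⟩

lemma pv_find_decomp {α : Type} (p : α → Bool) :
    ∀ (l : List α) (m : α), l.find? p = some m →
      ∃ l₁ l₂, l = l₁ ++ m :: l₂ ∧ (∀ y ∈ l₁, p y = false) ∧ p m = true := by
  intro l
  induction l with
  | nil => intro m h; simp at h
  | cons a l ih =>
    intro m h
    by_cases hp : p a = true
    · rw [List.find?_cons_of_pos hp] at h
      obtain rfl := Option.some_inj.mp h
      exact ⟨[], l, rfl, by simp, hp⟩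
    · rw [List.find?_cons_of_neg (by simpa using hp)] at h
      obtain ⟨l₁, l₂, rfl, h₁, hm⟩ := ih m h
      exact ⟨a :: l₁, l₂, rfl, by
        intro y hy
        rcases List.mem_cons.mp hy with h | h
        · subst h; simpa using hp
        · exact h₁ y h, hm⟩

lemma pv_sel_cases {α : Type} (kC kT kN : α → Bool) (flag : Bool) (fl : α → Int)
    (vm : List α) :
    (∃ m, vm.find? (fun m => kC m) = some m ∧
       PySem.List.max2? vm
         (fun m => if kC m then (4:Int) else if kT m && flag then 3 else if kN m then 1 else 2)
         (fun m => if kC m || (kT m && flag) then (0:Int) else fl m) = some m)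
  ∨ (vm.find? (fun m => kC m) = none ∧
     ∃ m, vm.find? (fun m => kT m && flag) = some m ∧
       PySem.List.max2? vm
         (fun m => if kC m then (4:Int) else if kT m && flag then 3 else if kN m then 1 else 2)
         (fun m => if kC m || (kT m && flag) then (0:Int) else fl m) = some m)
  ∨ (vm.find? (fun m => kC m) = none ∧
     vm.find? (fun m => kT m && flag) = none ∧
     (vm = [] ∨
      ∃ m, PySem.List.max? (if vm.filter (fun m => !kN m) = [] then vm
              else vm.filter (fun m => !kN m)) fl = some m ∧
        PySem.List.max2? vm
          (fun m => if kC m then (4:Int) else if kT m && flag then 3 else if kN m then 1 else 2)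
          (fun m => if kC m || (kT m && flag) then (0:Int) else fl m) = some m)) := by
  set k1 : α → Int := fun m => if kC m then (4:Int) else if kT m && flag then 3
    else if kN m then 1 else 2 with hk1
  set k2 : α → Int := fun m => if kC m || (kT m && flag) then (0:Int) else fl m with hk2
  have hK1C : ∀ m, kC m = true → k1 m = 4 := by
    intro m h; simp only [hk1]; rw [h]; simp
  have hK1le3 : ∀ m, kC m = false → k1 m ≤ 3 := by
    intro m h; simp only [hk1]; rw [h]; simp only [Bool.false_eq_true, if_false]
    split_ifs <;> omega
  have hK1T : ∀ m, kC m = false → (kT m && flag) = true → k1 m = 3 := by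
    intro m h h'; simp only [hk1]; rw [h, h']; simp
  have hK1le2 : ∀ m, kC m = false → (kT m && flag) = false → k1 m ≤ 2 := by
    intro m h h'; simp only [hk1]; rw [h, h']; simp only [Bool.false_eq_true, if_false]
    split_ifs <;> omega
  have hK1N : ∀ m, kC m = false → (kT m && flag) = false → kN m = true → k1 m = 1 := by
    intro m h h' h''; simp only [hk1]; rw [h, h', h'']; simp
  have hK1O : ∀ m, kC m = false → (kT m && flag) = false → kN m = false → k1 m = 2 := by
    intro m h h' h''; simp only [hk1]; rw [h, h', h'']; simp
  have hK2C : ∀ m, kC m = true → k2 m = 0 := by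
    intro m h; simp only [hk2]; rw [h]; simp
  have hK2T : ∀ m, (kT m && flag) = true → k2 m = 0 := by
    intro m h; simp only [hk2]; rw [h]; simp
  have hK2O : ∀ m, kC m = false → (kT m && flag) = false → k2 m = fl m := by
    intro m h h'; simp only [hk2]; rw [h, h']; simp
  rcases hfc : vm.find? (fun m => kC m) with _ | m
  · -- no corner among the valid moves
    have hC : ∀ y ∈ vm, kC y = false := by
      intro y hy; simpa using List.find?_eq_none.mp hfc y hy
    rcases hft : vm.find? (fun m => kT m && flag) with _ | m
    · -- no active T-square either
      have hT : ∀ y ∈ vm, (kT y && flag) = false := by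
        intro y hy; simpa using List.find?_eq_none.mp hft y hy
      by_cases hfe : vm.filter (fun m => !kN m) = []
      · -- every valid move is a corner neighbour
        have hN : ∀ y ∈ vm, kN y = true := by
          intro y hy; simpa using List.filter_eq_nil_iff.mp hfe y hy
        rw [if_pos hfe]
        rcases hmx : PySem.List.max? vm fl with _ | m
        · exact Or.inr (Or.inr ⟨rfl, rfl, Or.inl ((PySem.List.max?_eq_none_iff _ _).mp hmx)⟩)
        · obtain ⟨l₁, l₂, hvm', h₁, h₂⟩ := pv_max1_decomp fl vm m hmx
          subst hvm'
          have hmem : m ∈ l₁ ++ m :: l₂ := by simp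
          refine Or.inr (Or.inr ⟨rfl, rfl, Or.inr ⟨m, rfl, pv_max2_first k1 k2 l₁ m l₂ ?_ ?_⟩⟩)
          · intro y hy
            have hyv : y ∈ l₁ ++ m :: l₂ := by simp [hy]
            rw [pv_beats_true]
            have e1 := hK1N y (hC y hyv) (hT y hyv) (hN y hyv)
            have e2 := hK1N m (hC m hmem) (hT m hmem) (hN m hmem)
            have e3 := hK2O y (hC y hyv) (hT y hyv)
            have e4 := hK2O m (hC m hmem) (hT m hmem)
            have := h₁ y hy
            right; omega
          · intro y hy
            have hyv : y ∈ l₁ ++ m :: l₂ := by simp [hy]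
            rw [pv_beats_false]
            have e1 := hK1N y (hC y hyv) (hT y hyv) (hN y hyv)
            have e2 := hK1N m (hC m hmem) (hT m hmem) (hN m hmem)
            have e3 := hK2O y (hC y hyv) (hT y hyv)
            have e4 := hK2O m (hC m hmem) (hT m hmem)
            have := h₂ y hy
            omega
      · -- a non-neighbour valid move exists
        rw [if_neg hfe]
        rcases hmx : PySem.List.max? (vm.filter (fun m => !kN m)) fl with _ | m
        · exact absurd ((PySem.List.max?_eq_none_iff _ _).mp hmx) hfe
        · obtain ⟨f₁, f₂, hfil, h₁, h₂⟩ := pv_max1_decomp fl _ m hmx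
          obtain ⟨l₁, l₂, rfl, he₁, he₂, hqm⟩ := pv_filter_decomp _ vm f₁ f₂ m hfil
          have hNm : kN m = false := by simpa using hqm
          have hmem : m ∈ l₁ ++ m :: l₂ := by simp
          have e2 := hK1O m (hC m hmem) (hT m hmem) hNm
          have e4 := hK2O m (hC m hmem) (hT m hmem)
          refine Or.inr (Or.inr ⟨rfl, rfl, Or.inr ⟨m, rfl, pv_max2_first k1 k2 l₁ m l₂ ?_ ?_⟩⟩)
          · intro y hy
            have hyv : y ∈ l₁ ++ m :: l₂ := by simp [hy]
            rw [pv_beats_true]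
            rcases hny : kN y with _ | _
            · -- not a neighbour: y survived the filter, so its flip count is beaten
              have hyf : y ∈ f₁ := he₁ ▸ List.mem_filter.mpr ⟨hy, by simp [hny]⟩
              have e1 := hK1O y (hC y hyv) (hT y hyv) hny
              have e3 := hK2O y (hC y hyv) (hT y hyv)
              have := h₁ y hyf
              right; omega
            · have e1 := hK1N y (hC y hyv) (hT y hyv) hny
              left; omega
          · intro y hy
            have hyv : y ∈ l₁ ++ m :: l₂ := by simp [hy]
            rw [pv_beats_false]
            rcases hny : kN y with _ | _
            · have hyf : y ∈ f₂ := he₂ ▸ List.mem_filter.mpr ⟨hy, by simp [hny]⟩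
              have e1 := hK1O y (hC y hyv) (hT y hyv) hny
              have e3 := hK2O y (hC y hyv) (hT y hyv)
              have := h₂ y hyf
              omega
            · have e1 := hK1N y (hC y hyv) (hT y hyv) hny
              omega
    · -- first T-square move with an owned corner-neighbour cell
      obtain ⟨l₁, l₂, rfl, hpre, hm⟩ := pv_find_decomp _ vm m hft
      have hmem : m ∈ l₁ ++ m :: l₂ := by simp
      have e2 := hK1T m (hC m hmem) hm
      have e4 := hK2T m hm
      refine Or.inr (Or.inl ⟨rfl, m, rfl, pv_max2_first k1 k2 l₁ m l₂ ?_ ?_⟩)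
      · intro y hy
        have hyv : y ∈ l₁ ++ m :: l₂ := by simp [hy]
        rw [pv_beats_true]
        have e1 := hK1le2 y (hC y hyv) (hpre y hy)
        left; omega
      · intro y hy
        have hyv : y ∈ l₁ ++ m :: l₂ := by simp [hy]
        rw [pv_beats_false]
        rcases hty : (kT y && flag) with _ | _
        · have e1 := hK1le2 y (hC y hyv) hty
          omega
        · have e1 := hK1T y (hC y hyv) hty
          have e3 := hK2T y hty
          omega
  · -- first corner move wins
    obtain ⟨l₁, l₂, rfl, hpre, hm⟩ := pv_find_decomp _ vm m hfc
    have hmem : m ∈ l₁ ++ m :: l₂ := by simp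
    have e2 := hK1C m hm
    have e4 := hK2C m hm
    refine Or.inl ⟨m, rfl, pv_max2_first k1 k2 l₁ m l₂ ?_ ?_⟩
    · intro y hy
      have e1 := hK1le3 y (hpre y hy)
      rw [pv_beats_true]
      left; omega
    · intro y hy
      rw [pv_beats_false]
      rcases hcy : kC y with _ | _
      · have e1 := hK1le3 y hcy
        omega
      · have e1 := hK1C y hcy
        have e3 := hK2C y hcy
        omega

lemma pv_inner_eq (board : List (List Int)) (color opp row : Int) :
    ∀ (l : List Int) (acc : List (Int × Int × Int)),
      l.foldl (fun acc col =>
        if pvCell board row col = 0 then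
          let f := pvCountFlips board col row color opp
          if f > 0 then acc ++ [(col, row, f)] else acc
        else acc) acc
      = acc ++ l.filterMap (fun c =>
          if pvCell board row c = 0 then
            let f := pvFlipsAt board c row color opp
            if f > 0 then some (c, row, f) else none
          else none) := by
  intro l
  induction l with
  | nil => intro acc; simp
  | cons c l ih =>
    intro acc
    simp only [List.foldl_cons, List.filterMap_cons]
    rw [← pv_flips_eq board c row color opp]
    by_cases h0 : pvCell board row c = 0
    · simp only [if_pos h0]
      by_cases hf : pvCountFlips board c row color opp > 0
      · simp only [if_pos hf]
        rw [ih]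
        simp
      · simp only [if_neg hf]
        exact ih acc
    · simp only [if_neg h0]
      exact ih acc

lemma pv_vm_eq (board : List (List Int)) (color opp : Int) :
    (PySem.List.pyRange 0 (board.length : Int) 1).foldl (fun acc row =>
      (PySem.List.pyRange 0 (board.length : Int) 1).foldl (fun acc col =>
        if pvCell board row col = 0 then
          let f := pvCountFlips board col row color opp
          if f > 0 then acc ++ [(col, row, f)] else acc
        else acc) acc) []
    = (PySem.List.pyRange 0 (board.length : Int) 1).flatMap (fun r =>
        (PySem.List.pyRange 0 (board.length : Int) 1).filterMap (fun c =>
          if pvCell board r c = 0 then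
            let f := pvFlipsAt board c r color opp
            if f > 0 then some (c, r, f) else none
          else none)) := by
  refine Eq.trans (PySem.List.foldl_congr_mem _ _
      (fun acc r => acc ++
        (PySem.List.pyRange 0 (board.length : Int) 1).filterMap (fun c =>
          if pvCell board r c = 0 then
            let f := pvFlipsAt board c r color opp
            if f > 0 then some (c, r, f) else none
          else none)) []
      (fun acc r _ => pv_inner_eq board color opp r _ acc)) ?_
  refine Eq.trans (PySem.List.foldl_append_eq_flatMap _ _ []) ?_
  simp

theorem myai_main (board : List (List Int)) (color : Int) :
    myai board color = myai_alt board color := by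
  unfold myai myai_alt
  simp only []
  rw [pv_vm_eq board color (3 - color)]
  set vm := (PySem.List.pyRange 0 (board.length : Int) 1).flatMap (fun r =>
      (PySem.List.pyRange 0 (board.length : Int) 1).filterMap (fun c =>
        if pvCell board r c = 0 then
          let f := pvFlipsAt board c r color (3 - color)
          if f > 0 then some (c, r, f) else none
        else none)) with hvm
  by_cases h : vm = []
  · rw [if_pos h, if_pos h]
  · rw [if_neg h, if_neg h]
    rcases pv_sel_cases
        (fun m => (pvCorners (board.length : Int)).contains (m.1, m.2.1))
        (fun m => (pvTpos (board.length : Int)).contains (m.1, m.2.1))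
        (fun m => (pvNeighbors (board.length : Int)).contains (m.1, m.2.1))
        ((pvNeighbors (board.length : Int)).any (fun p => pvCell board p.2 p.1 == color))
        (fun m => m.2.2) vm with
      ⟨m, hfc, hmx⟩ | ⟨hfc, m, hft, hmx⟩ | ⟨hfc, hft, hrest⟩
    · rw [hfc, hmx]
    · rw [hfc, hft, hmx]
    · rcases hrest with hnil | ⟨m, hsel, hmx⟩
      · exact absurd hnil h
      · rw [hfc, hft, hsel, hmx]

-- ===== VERDICT (by name: the statement is the Claim_ definition above) =====
theorem myai_spec : Claim_equal_myai := by
  intro board color _ _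
  unfold Spec_myai
  exact myai_main board color
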